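-- pv_equiv track=rewrite | github.com/romeorizzi/TALight | tal_algo/private/triangolo_opt_sol/sol/sol_erratic.py | eval_sol_unsafe
-- ===== SOURCE A (Python) =====
-- def eval_sol_unsafe(Tr,sol):
--     n = len(Tr)
--     assert len(sol) == n-1
--     r = 0; c = 0
--     val_sol = Tr[r][c]
--     while r+1 < n:
--         assert sol[r] in {'L','R'}
--         if sol[r] == 'R':
--             c += 1
--         r += 1
--         val_sol += Tr[r][c]
--     return val_sol
-- ===== SOURCE B (Python) =====
-- def eval_sol_unsafe(Tr, sol):
--     # Structural recursion on the move string: instead of walking with a column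
--     # index, each 'R' step trims the leading element off every remaining row,
--     # so the target cell is always at [0][0].
--     assert len(sol) == len(Tr) - 1
--     if not sol:
--         return Tr[0][0]
--     m = sol[0]
--     assert m in {'L', 'R'}
--     rest = [row[1:] for row in Tr[1:]] if m == 'R' else Tr[1:]
--     return Tr[0][0] + eval_sol_unsafe(rest, sol[1:])
-- ===== Notes on version B (the rewrite author's own statement) =====
-- stated objective: alternative
-- what changed: B replaces A's iterative walk that threads a column index through the triangle by a recursion on the move string that rewrites the data: an 'R' move trims the first element off every remaining row, so the visited cell is always at position [0][0] and no row/column indices are maintained at all.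
import Mathlib
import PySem

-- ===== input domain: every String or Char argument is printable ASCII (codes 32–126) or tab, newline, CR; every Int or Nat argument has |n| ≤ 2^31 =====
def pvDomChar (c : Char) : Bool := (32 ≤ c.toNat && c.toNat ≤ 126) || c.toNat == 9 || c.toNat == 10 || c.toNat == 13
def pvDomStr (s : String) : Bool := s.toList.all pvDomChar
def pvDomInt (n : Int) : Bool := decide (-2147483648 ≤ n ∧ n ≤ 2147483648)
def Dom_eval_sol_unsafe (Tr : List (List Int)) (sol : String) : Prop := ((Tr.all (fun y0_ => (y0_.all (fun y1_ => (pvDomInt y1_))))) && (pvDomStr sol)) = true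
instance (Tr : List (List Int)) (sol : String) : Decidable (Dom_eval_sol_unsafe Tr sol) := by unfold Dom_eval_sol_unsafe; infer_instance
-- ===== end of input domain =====

-- B recurses on the move string and trims rows ('R' drops each remaining row's head) instead of threading a column index; alternative decomposition, not faster.


-- ===== PORT A =====
-- literal port of A's while-loop: state (r, c, val_sol), one step per iteration
def evalLoopA (Tr : List (List Int)) (chars : List Char) (n r c : Nat) (val : Int) : Int :=
  if _h : r + 1 < n then
    let c' : Nat := if PySem.List.pyGetD chars (r : Int) ' ' = 'R' then c + 1 else c
    evalLoopA Tr chars n (r + 1) c'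
      (val + PySem.List.pyGetD (PySem.List.pyGetD Tr ((r + 1 : Nat) : Int) []) ((c' : Nat) : Int) 0)
  else val
termination_by n - r
decreasing_by omega

def eval_sol_unsafe (Tr : List (List Int)) (sol : String) : Int :=
  evalLoopA Tr sol.toList Tr.length 0 0 (PySem.List.pyGetD (PySem.List.pyGetD Tr 0 []) 0 0)

-- ===== PORT B =====
-- port of Source B's recursion on the move string ('if not sol' is the base case; Tr[1:] and
-- row[1:] are Python slices). Indexing Tr[0][0] is pyGetD, in range inside Pre_.
def altRecB (Tr : List (List Int)) (moves : List Char) : Int :=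
  match moves with
  | [] => PySem.List.pyGetD (PySem.List.pyGetD Tr 0 []) 0 0
  | m :: ms =>
      let rest := if m = 'R'
        then (PySem.List.slice Tr (some 1) none).map (fun row => PySem.List.slice row (some 1) none)
        else PySem.List.slice Tr (some 1) none
      PySem.List.pyGetD (PySem.List.pyGetD Tr 0 []) 0 0 + altRecB rest ms

def eval_sol_unsafe_alt (Tr : List (List Int)) (sol : String) : Int :=
  altRecB Tr sol.toList

-- ===== PRECONDITION & SPEC =====
-- Pre_ = exactly the inputs where Python A returns: nonempty triangle, moves have length n-1
-- and are all 'L'/'R', and every visited cell exists (column = prefix count of 'R' is in range).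
def Pre_eval_sol_unsafe (Tr : List (List Int)) (sol : String) : Prop :=
  Tr ≠ [] ∧ sol.toList.length = Tr.length - 1 ∧
  (sol.toList.all (fun m => m == 'L' || m == 'R')) = true ∧
  (∀ r < Tr.length, (sol.toList.take r).count 'R' < (Tr.getD r []).length)
instance (Tr : List (List Int)) (sol : String) : Decidable (Pre_eval_sol_unsafe Tr sol) := by
  unfold Pre_eval_sol_unsafe; infer_instance

def pvWitness_eval_sol_unsafe : List (List Int) × String := ([[1], [2, 3]], "R")

def Spec_eval_sol_unsafe (Tr : List (List Int)) (sol : String) (out : Int) : Prop := out = eval_sol_unsafe_alt Tr sol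
instance (Tr : List (List Int)) (sol : String) (out : Int) : Decidable (Spec_eval_sol_unsafe Tr sol out) := by unfold Spec_eval_sol_unsafe; infer_instance

-- ===== CLAIM (what is proved, stated in full; the proofs are below) =====
def Claim_equal_eval_sol_unsafe : Prop := ∀ (Tr : List (List Int)) (sol : String), Dom_eval_sol_unsafe Tr sol → Pre_eval_sol_unsafe Tr sol → Spec_eval_sol_unsafe Tr sol (eval_sol_unsafe Tr sol)

-- ===== LEMMAS AND PROOFS =====

-- the cell visited at row k: column = number of 'R' among the first k moves
def cell (Tr : List (List Int)) (chars : List Char) (k : Nat) : Int :=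
  (Tr.getD k []).getD ((chars.take k).count 'R') 0

-- ---- A side: the loop sums cell over rows 1..n-1 ----
lemma loopA_eq (Tr : List (List Int)) (chars : List Char) (n : Nat) :
    ∀ (d r : Nat) (val : Int), r < chars.length + 1 → r + d = n - 1 → chars.length = n - 1 →
      evalLoopA Tr chars n r ((chars.take r).count 'R') val
        = val + ((List.range' (r + 1) d).map (cell Tr chars)).sum := by
  intro d
  induction d with
  | zero =>
    intro r val _ hr _
    rw [evalLoopA]
    have : ¬ (r + 1 < n) := by omega
    simp [this]
  | succ d ih =>
    intro r val hrb hr hlen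
    rw [evalLoopA]
    have h1 : r + 1 < n := by omega
    have hrl : r < chars.length := by omega
    simp only [h1, dif_pos]
    have hm : PySem.List.pyGetD chars (r : Int) ' ' = chars[r] := by
      rw [PySem.List.pyGetD_natCast]
      simp [List.getD_eq_getElem?_getD, List.getElem?_eq_getElem hrl]
    have hc' : (if PySem.List.pyGetD chars (r : Int) ' ' = 'R'
        then (chars.take r).count 'R' + 1 else (chars.take r).count 'R')
        = (chars.take (r + 1)).count 'R' := by
      rw [hm]
      have ht : chars.take (r + 1) = chars.take r ++ [chars[r]] := by
        rw [List.take_add_one, List.getElem?_eq_getElem hrl]; rfl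
      rw [ht, List.count_append]
      by_cases hc : chars[r] = 'R' <;> simp [hc]
    rw [hc']
    have hcell : PySem.List.pyGetD (PySem.List.pyGetD Tr ((r + 1 : Nat) : Int) [])
        (((chars.take (r + 1)).count 'R' : Nat) : Int) 0 = cell Tr chars (r + 1) := by
      rw [PySem.List.pyGetD_natCast, PySem.List.pyGetD_natCast]
      simp [cell]
    rw [hcell, ih (r + 1) (val + cell Tr chars (r + 1)) (by omega) (by omega) hlen]
    rw [List.range'_succ]
    simp only [List.map_cons, List.sum_cons]
    ring

-- ---- B side helpers ----
lemma range'_shift (n s : Nat) : List.range' (s + 1) n = (List.range' s n).map (· + 1) := by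
  induction n generalizing s with
  | zero => rfl
  | succ n ih => simp [List.range'_succ, ih]

lemma getD_rest (Tr : List (List Int)) (m : Char) (k : Nat) :
    ((if m = 'R'
        then (Tr.drop 1).map (fun row => row.drop 1)
        else Tr.drop 1).getD k []) =
      (if m = 'R' then (Tr.getD (k + 1) []).drop 1 else Tr.getD (k + 1) []) := by
  have hd : (Tr.drop 1).getD k [] = Tr.getD (k + 1) [] := by
    simp [List.getD_eq_getElem?_getD]
  by_cases hm : m = 'R'
  · simp only [hm, if_pos]
    rcases h : (Tr.drop 1)[k]? with _ | row
    · have : Tr[k + 1]? = none := by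
        rw [← List.getElem?_drop]; simpa [Nat.add_comm] using h
      simp [List.getD_eq_getElem?_getD, this]
    · have : Tr[k + 1]? = some row := by
        rw [← List.getElem?_drop]; simpa [Nat.add_comm] using h
      simp [List.getD_eq_getElem?_getD, this]
  · simpa [hm] using hd

lemma cell_shift (Tr : List (List Int)) (m : Char) (ms : List Char) (k : Nat) :
    cell (if m = 'R'
        then (Tr.drop 1).map (fun row => row.drop 1)
        else Tr.drop 1) ms k = cell Tr (m :: ms) (k + 1) := by
  unfold cell
  rw [getD_rest]
  by_cases hm : m = 'R'
  · simp only [hm, if_pos, List.take_succ_cons, List.count_cons]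
    rw [List.getD_eq_getElem?_getD, List.getElem?_drop, ← List.getD_eq_getElem?_getD]
    simp [Nat.add_comm]
  · simp [hm, List.take_succ_cons]

lemma altRecB_eq (moves : List Char) : ∀ (Tr : List (List Int)),
    altRecB Tr moves
      = (Tr.getD 0 []).getD 0 0 + ((List.range' 1 moves.length).map (cell Tr moves)).sum := by
  induction moves with
  | nil =>
    intro Tr
    simp [altRecB, PySem.List.pyGetD_zero]
  | cons m ms ih =>
    intro Tr
    rw [altRecB]
    have hs : PySem.List.slice Tr (some 1) none = Tr.drop 1 := by
      simpa using PySem.List.slice_from_natCast Tr 1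
    have hrw : (fun row : List Int => PySem.List.slice row (some 1) none)
        = (fun row : List Int => row.drop 1) := by
      funext row; simpa using PySem.List.slice_from_natCast row 1
    simp only [hs, hrw]
    rw [ih]
    have hm01 : (((if m = 'R' then (Tr.drop 1).map (fun row => row.drop 1) else Tr.drop 1) :
        List (List Int)).getD 0 []).getD 0 0 = cell Tr (m :: ms) 1 := by
      have := cell_shift Tr m ms 0
      simpa [cell] using this
    have hmap : (List.range' 1 ms.length).map
        (cell (if m = 'R' then (Tr.drop 1).map (fun row => row.drop 1) else Tr.drop 1) ms)
        = (List.range' (1 + 1) ms.length).map (cell Tr (m :: ms)) := by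
      rw [range'_shift ms.length 1, List.map_map]
      apply List.map_congr_left
      intro k _
      simpa using cell_shift Tr m ms k
    simp only [List.length_cons]
    rw [List.range'_succ]
    simp only [List.map_cons, List.sum_cons]
    rw [← hmap, hm01]
    simp only [PySem.List.pyGetD_zero]

-- ===== VERDICT (by name: the statement is the Claim_ definition above) =====
theorem eval_sol_unsafe_spec : Claim_equal_eval_sol_unsafe := by
  intro Tr sol _hDom hPre
  obtain ⟨hne, hlen, _hmv, _hrng⟩ := hPre
  have hn : 1 ≤ Tr.length := by
    cases Tr with
    | nil => exact absurd rfl hne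
    | cons a l => simp
  unfold Spec_eval_sol_unsafe eval_sol_unsafe eval_sol_unsafe_alt
  have hA := loopA_eq Tr sol.toList Tr.length (Tr.length - 1) 0
    (PySem.List.pyGetD (PySem.List.pyGetD Tr 0 []) 0 0) (by omega) (by omega) hlen
  simp only [List.take_zero, List.count_nil] at hA
  rw [hA, altRecB_eq, hlen]
  simp [PySem.List.pyGetD_zero]
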